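-- pv_equiv track=rewrite | github.com/AdamZhouSE/pythonHomework | Code/CodeRecords/2203/61053/265543.py | cal_mis
-- ===== SOURCE A (Python) =====
-- def cal_mis(str):
--     n = len(str)
--     ans = 0
--     for i in range(0,n):
--         for j in range(i+1,n):
--            L = j - i + 1
--            while j+L<=n and str[i:i+L] == str[j:j+L]:
--                ans += L
--                ans %= (10**9+7)
--                L += 1
--     return ans
-- ===== SOURCE B (Python) =====
-- def cal_mis(str):
--     # One pass per shift d: walk the diagonal right-to-left maintaining the
--     # longest common extension `run` of the suffixes at i and i+d, and add the
--     # arithmetic series sum_{L=d+1..run} L in closed form.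
--     n = len(str)
--     total = 0
--     for d in range(1, n):
--         run = 0
--         for i in range(n - d - 1, -1, -1):
--             if str[i] == str[i + d]:
--                 run += 1
--             else:
--                 run = 0
--             if run >= d + 1:
--                 total += (run + d + 1) * (run - d) // 2
--     return total % (10 ** 9 + 7)
-- ===== Notes on version B (the rewrite author's own statement) =====
-- stated objective: faster
-- what changed: Replaces the per-pair O(n^2) while-loop of slice comparisons with a single right-to-left pass per shift d that maintains the longest-common-extension run length and adds each pair's contribution via the arithmetic-series closed form.
import Mathlib
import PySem

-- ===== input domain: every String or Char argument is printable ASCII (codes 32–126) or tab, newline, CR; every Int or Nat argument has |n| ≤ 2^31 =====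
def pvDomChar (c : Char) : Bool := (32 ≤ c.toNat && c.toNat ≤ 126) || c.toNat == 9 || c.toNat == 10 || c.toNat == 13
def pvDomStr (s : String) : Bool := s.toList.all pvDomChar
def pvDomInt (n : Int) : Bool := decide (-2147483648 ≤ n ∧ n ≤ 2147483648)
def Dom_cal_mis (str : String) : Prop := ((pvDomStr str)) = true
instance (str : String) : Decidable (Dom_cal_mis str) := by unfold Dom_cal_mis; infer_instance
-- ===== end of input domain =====

-- B replaces A's per-pair while-loop of slice comparisons by one right-to-left pass per
-- shift maintaining the longest-common-extension run, adding each pair's arithmetic series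
-- in closed form (objective: faster; measured).


-- ===== PORT A =====
-- the 'while j+L<=n and str[i:i+L] == str[j:j+L]' loop; fuel bounds the iteration count
-- (cs.length + 1 at the call site is always sufficient, proved below)
def calMisWhile (cs : List Char) (n i j : Int) : Nat → Int → Int → Int
  | 0, _, ans => ans
  | fuel+1, L, ans =>
    if j + L ≤ n ∧ PySem.List.slice cs (some i) (some (i + L)) = PySem.List.slice cs (some j) (some (j + L)) then
      calMisWhile cs n i j fuel (L + 1) (PySem.Int.mod (ans + L) (10 ^ 9 + 7))
    else ans

def cal_mis (str : String) : Int :=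
  let cs := str.toList
  let n : Int := cs.length
  (PySem.List.pyRange 0 n 1).foldl (fun ans i =>
    (PySem.List.pyRange (i + 1) n 1).foldl (fun ans j =>
      calMisWhile cs n i j (cs.length + 1) (j - i + 1) ans) ans) 0

-- ===== PORT B =====
-- the body of B's inner loop: update the run length, add the closed-form series
def calMisStep (cs : List Char) (d : Int) (st : Int × Int) (i : Int) : Int × Int :=
  let run := if PySem.List.pyGetD cs i ' ' = PySem.List.pyGetD cs (i + d) ' ' then st.1 + 1 else (0 : Int)
  (run, if d + 1 ≤ run then st.2 + PySem.Int.floordiv ((run + d + 1) * (run - d)) 2 else st.2)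

def cal_mis_alt (str : String) : Int :=
  let cs := str.toList
  let n : Int := cs.length
  let total := (PySem.List.pyRange 1 n 1).foldl (fun total d =>
    ((PySem.List.pyRange (n - d - 1) (-1) (-1)).foldl (calMisStep cs d) ((0 : Int), total)).2) 0
  PySem.Int.mod total (10 ^ 9 + 7)

-- ===== PRECONDITION & SPEC =====
def Spec_cal_mis (str : String) (out : Int) : Prop := out = cal_mis_alt str
instance (str : String) (out : Int) : Decidable (Spec_cal_mis str out) := by unfold Spec_cal_mis; infer_instance

-- ===== CLAIM (what is proved, stated in full; the proofs are below) =====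
def Claim_equal_cal_mis : Prop := ∀ (str : String), Dom_cal_mis str → Spec_cal_mis str (cal_mis str)

-- ===== LEMMAS AND PROOFS =====

-- longest common extension of the suffixes of cs at i and j
def lce (cs : List Char) (i j : Nat) : Nat :=
  if h : i < cs.length ∧ j < cs.length ∧ cs[i]? = cs[j]? then lce cs (i+1) (j+1) + 1 else 0
termination_by cs.length - i
decreasing_by omega

-- sum of the integers L, L+1, …, E (0 if E < L): the values A's while loop adds
def tailSum (E L : Int) : Int :=
  if L ≤ E then L + tailSum E (L+1) else 0
termination_by (E + 1 - L).toNat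
decreasing_by omega

lemma lce_le (cs : List Char) : ∀ (k i j : Nat), cs.length - i ≤ k → lce cs i j ≤ cs.length - j := by
  intro k
  induction k with
  | zero =>
    intro i j hk
    rw [lce]
    split
    · omega
    · omega
  | succ k ih =>
    intro i j hk
    rw [lce]
    split
    · rename_i h
      have := ih (i+1) (j+1) (by omega)
      omega
    · omega

lemma take_drop_eq_iff (cs : List Char) :
    ∀ (L i j : Nat), j + L ≤ cs.length →
      (((cs.drop i).take L = (cs.drop j).take L) ↔ L ≤ lce cs i j) := by
  intro L
  induction L with
  | zero => intro i j _; simp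
  | succ L ih =>
    intro i j hj
    have hjlt : j < cs.length := by omega
    rw [List.drop_eq_getElem_cons hjlt]
    by_cases hi : i < cs.length
    · rw [List.drop_eq_getElem_cons hi]
      simp only [List.take_succ_cons, List.cons.injEq]
      rw [ih (i+1) (j+1) (by omega)]
      conv_rhs => rw [lce]
      by_cases hc : cs[i] = cs[j]
      · rw [dif_pos ⟨hi, hjlt, by rw [List.getElem?_eq_getElem hi, List.getElem?_eq_getElem hjlt, hc]⟩]
        constructor
        · rintro ⟨_, h2⟩; omega
        · intro h; exact ⟨hc, by omega⟩
      · rw [dif_neg (by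
          rintro ⟨_, _, hq⟩
          rw [List.getElem?_eq_getElem hi, List.getElem?_eq_getElem hjlt] at hq
          exact hc (Option.some.inj hq))]
        constructor
        · rintro ⟨h1, _⟩; exact absurd h1 hc
        · omega
    · have hd : cs.drop i = [] := List.drop_eq_nil_of_le (by omega)
      rw [hd]
      conv_rhs => rw [lce]
      rw [dif_neg (fun hq => hi hq.1)]
      constructor
      · intro h
        exfalso
        have hlen := congrArg List.length h
        simp at hlen
        omega
      · omega

lemma tailSum_closed : ∀ (E L : Int),
    tailSum E L = if L ≤ E then PySem.Int.floordiv ((E + L) * (E - L + 1)) 2 else 0 := by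
  intro E L
  induction hk : (E + 1 - L).toNat using Nat.strong_induction_on generalizing L with
  | _ k ih =>
    rw [tailSum]
    by_cases h : L ≤ E
    · rw [if_pos h, if_pos h]
      rw [ih (E + 1 - (L+1)).toNat (by omega) (L+1) rfl]
      rw [PySem.Int.floordiv_eq_ediv_of_pos (by norm_num : (0:Int) < 2)]
      by_cases h2 : L + 1 ≤ E
      · rw [if_pos h2]
        rw [PySem.Int.floordiv_eq_ediv_of_pos (by norm_num : (0:Int) < 2)]
        rw [show (E + L) * (E - L + 1) = (E + (L+1)) * (E - (L+1) + 1) + L * 2 from by ring]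
        rw [Int.add_mul_ediv_right _ _ (by norm_num : (2:Int) ≠ 0)]
        ring
      · rw [if_neg h2]
        have hEL : E = L := by omega
        subst hEL
        rw [PySem.Int.floordiv_eq_ediv_of_pos (by norm_num : (0:Int) < 2)]
        rw [show (E + E) * (E - E + 1) = E * 2 from by ring]
        rw [Int.mul_ediv_cancel _ (by norm_num : (2:Int) ≠ 0)]
        omega
    · rw [if_neg h, if_neg h]

lemma cond_iff (cs : List Char) (i j L : Int) (hi : 0 ≤ i) (hj : 0 ≤ j)
    (hjn : j ≤ (cs.length : Int)) (hL : 0 ≤ L) :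
    (j + L ≤ (cs.length : Int) ∧
      PySem.List.slice cs (some i) (some (i + L)) = PySem.List.slice cs (some j) (some (j + L)))
    ↔ L ≤ ((lce cs i.toNat j.toNat : Nat) : Int) := by
  have hs1 : PySem.List.slice cs (some i) (some (i + L)) = (cs.drop i.toNat).take L.toNat := by
    rw [PySem.List.slice_toNat cs hi (by omega)]
    congr 1
    omega
  have hs2 : PySem.List.slice cs (some j) (some (j + L)) = (cs.drop j.toNat).take L.toNat := by
    rw [PySem.List.slice_toNat cs hj (by omega)]
    congr 1
    omega
  rw [hs1, hs2]
  have hle := lce_le cs cs.length i.toNat j.toNat (by omega)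
  constructor
  · rintro ⟨hb, heq⟩
    have := (take_drop_eq_iff cs L.toNat i.toNat j.toNat (by omega)).mp heq
    omega
  · intro h
    refine ⟨by omega, (take_drop_eq_iff cs L.toNat i.toNat j.toNat (by omega)).mpr (by omega)⟩

lemma mod_eq (x : Int) : PySem.Int.mod x (10 ^ 9 + 7) = x % (10 ^ 9 + 7) :=
  PySem.Int.mod_eq_emod_of_pos (by norm_num)

lemma calMisWhile_run (cs : List Char) (n i j : Int) (hn : n = (cs.length : Int))
    (hi : 0 ≤ i) (hj : 0 ≤ j) (hjn : j ≤ (cs.length : Int)) :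
    ∀ (fuel : Nat) (L t : Int), 0 ≤ L →
      (((lce cs i.toNat j.toNat : Nat) : Int) + 1 - L).toNat < fuel →
      calMisWhile cs n i j fuel L (t % (10 ^ 9 + 7))
        = (t + tailSum ((lce cs i.toNat j.toNat : Nat) : Int) L) % (10 ^ 9 + 7) := by
  subst hn
  intro fuel
  induction fuel with
  | zero => intro L t _ hf; omega
  | succ f ih =>
    intro L t hL hf
    simp only [calMisWhile]
    rw [tailSum]
    by_cases h : L ≤ ((lce cs i.toNat j.toNat : Nat) : Int)
    · rw [if_pos ((cond_iff cs i j L hi hj hjn hL).mpr h), if_pos h]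
      have harg : PySem.Int.mod (t % (10 ^ 9 + 7) + L) (10 ^ 9 + 7) = (t + L) % (10 ^ 9 + 7) := by
        rw [mod_eq]; omega
      rw [harg, ih (L+1) (t+L) (by omega) (by omega), add_assoc]
    · rw [if_neg (fun hc => h ((cond_iff cs i j L hi hj hjn hL).mp hc)), if_neg h, add_zero]

-- A's inner loop over j, accumulated modulo p
lemma foldA_inner (cs : List Char) (n i : Int) (hn : n = (cs.length : Int)) (hi : 0 ≤ i) :
    ∀ (k : Nat) (b t : Int), (n - b).toNat ≤ k → i < b →
      (PySem.List.pyRange b n 1).foldl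
          (fun ans j => calMisWhile cs n i j (cs.length + 1) (j - i + 1) ans) (t % (10 ^ 9 + 7))
        = (t + ((PySem.List.pyRange b n 1).map
            (fun j => tailSum ((lce cs i.toNat j.toNat : Nat) : Int) (j - i + 1))).sum) % (10 ^ 9 + 7) := by
  intro k
  induction k with
  | zero =>
    intro b t hk hb
    rw [PySem.List.pyRange_one_eq_nil (by omega)]
    simp
  | succ k ih =>
    intro b t hk hb
    by_cases h : b < n
    · rw [PySem.List.pyRange_one_cons h]
      simp only [List.foldl_cons, List.map_cons, List.sum_cons]
      have hlce := lce_le cs cs.length i.toNat b.toNat (by omega)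
      rw [calMisWhile_run cs n i b hn hi (by omega) (by omega) _ (b - i + 1) t (by omega)
        (by omega)]
      rw [ih (b+1) (t + tailSum ((lce cs i.toNat b.toNat : Nat) : Int) (b - i + 1)) (by omega) (by omega)]
      rw [add_assoc]
    · rw [PySem.List.pyRange_one_eq_nil (by omega)]
      simp

lemma foldA_outer (cs : List Char) (n : Int) (hn : n = (cs.length : Int)) :
    ∀ (k : Nat) (a t : Int), (n - a).toNat ≤ k → 0 ≤ a →
      (PySem.List.pyRange a n 1).foldl
          (fun ans i => (PySem.List.pyRange (i + 1) n 1).foldl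
            (fun ans j => calMisWhile cs n i j (cs.length + 1) (j - i + 1) ans) ans) (t % (10 ^ 9 + 7))
        = (t + ((PySem.List.pyRange a n 1).map (fun i =>
            ((PySem.List.pyRange (i + 1) n 1).map
              (fun j => tailSum ((lce cs i.toNat j.toNat : Nat) : Int) (j - i + 1))).sum)).sum) % (10 ^ 9 + 7) := by
  intro k
  induction k with
  | zero =>
    intro a t hk ha
    rw [PySem.List.pyRange_one_eq_nil (by omega)]
    simp
  | succ k ih =>
    intro a t hk ha
    by_cases h : a < n
    · rw [PySem.List.pyRange_one_cons h]
      simp only [List.foldl_cons, List.map_cons, List.sum_cons]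
      rw [foldA_inner cs n a hn ha (n - (a+1)).toNat (a+1) t (le_refl _) (by omega)]
      rw [ih (a+1) _ (by omega) (by omega)]
      rw [add_assoc]
    · rw [PySem.List.pyRange_one_eq_nil (by omega)]
      simp

lemma cal_mis_eq (str : String) :
    cal_mis str = (((PySem.List.pyRange 0 (str.toList.length : Int) 1).map (fun i =>
        ((PySem.List.pyRange (i + 1) (str.toList.length : Int) 1).map
          (fun j => tailSum ((lce str.toList i.toNat j.toNat : Nat) : Int) (j - i + 1))).sum)).sum) % (10 ^ 9 + 7) := by
  have hdef : cal_mis str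
      = (PySem.List.pyRange 0 (str.toList.length : Int) 1).foldl (fun ans i =>
          (PySem.List.pyRange (i + 1) (str.toList.length : Int) 1).foldl
            (fun ans j => calMisWhile str.toList (str.toList.length : Int) i j (str.toList.length + 1) (j - i + 1) ans) ans) 0 := rfl
  have hfold := foldA_outer str.toList (str.toList.length : Int) rfl
    ((str.toList.length : Int) - 0).toNat 0 0 (le_refl _) (le_refl _)
  rw [Int.zero_emod] at hfold
  rw [hdef, hfold, zero_add]

-- B's inner loop over i (descending): the first state component is the current run = lce
lemma foldB_inner (cs : List Char) (n : Int) (hn : n = (cs.length : Int)) (d : Int)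
    (hd1 : 1 ≤ d) (hdn : d < n) :
    ∀ (k : Nat) (a t : Int), (a + 1).toNat ≤ k → -1 ≤ a → a ≤ n - d - 1 →
      (PySem.List.pyRange a (-1) (-1)).foldl (calMisStep cs d)
          (((lce cs (a+1).toNat (a+1+d).toNat : Nat) : Int), t)
        = (((lce cs 0 d.toNat : Nat) : Int),
            t + ((PySem.List.pyRange a (-1) (-1)).map
              (fun i => tailSum ((lce cs i.toNat (i+d).toNat : Nat) : Int) (d + 1))).sum) := by
  subst hn
  intro k
  induction k with
  | zero =>
    intro a t hk h1 h2
    have ha : a = -1 := by omega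
    subst ha
    rw [PySem.List.pyRange_neg_one_eq_nil (le_refl _)]
    norm_num
  | succ k ih =>
    intro a t hk h1 h2
    by_cases h : 0 ≤ a
    · rw [PySem.List.pyRange_neg_one_cons (by omega : (-1 : Int) < a)]
      simp only [List.foldl_cons, List.map_cons, List.sum_cons]
      have ha1 : a.toNat < cs.length := by omega
      have ha2 : (a+d).toNat < cs.length := by omega
      have hrun : (if PySem.List.pyGetD cs a ' ' = PySem.List.pyGetD cs (a + d) ' '
            then ((lce cs (a+1).toNat (a+1+d).toNat : Nat) : Int) + 1 else (0 : Int))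
          = ((lce cs a.toNat (a+d).toNat : Nat) : Int) := by
        have hga : PySem.List.pyGetD cs a ' ' = cs[a.toNat]'ha1 :=
          PySem.List.pyGetD_eq_getElem cs ' ' h (by omega)
        have hgb : PySem.List.pyGetD cs (a + d) ' ' = cs[(a+d).toNat]'ha2 :=
          PySem.List.pyGetD_eq_getElem cs ' ' (by omega) (by omega)
        rw [hga, hgb]
        conv_rhs => rw [lce]
        by_cases hc : cs[a.toNat] = cs[(a+d).toNat]
        · rw [dif_pos ⟨ha1, ha2, by rw [List.getElem?_eq_getElem ha1, List.getElem?_eq_getElem ha2, hc]⟩,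
              if_pos hc]
          rw [show (a+1).toNat = a.toNat + 1 from by omega,
              show (a+1+d).toNat = (a+d).toNat + 1 from by omega]
          push_cast
          ring
        · rw [dif_neg (by
            rintro ⟨_, _, hq⟩
            rw [List.getElem?_eq_getElem ha1, List.getElem?_eq_getElem ha2] at hq
            exact hc (Option.some.inj hq)), if_neg hc]
          norm_num
      have hstep : calMisStep cs d (((lce cs (a+1).toNat (a+1+d).toNat : Nat) : Int), t) a
          = (((lce cs a.toNat (a+d).toNat : Nat) : Int),
              t + tailSum ((lce cs a.toNat (a+d).toNat : Nat) : Int) (d + 1)) := by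
        simp only [calMisStep]
        rw [hrun]
        rw [tailSum_closed]
        refine Prod.ext rfl ?_
        rw [show ((lce cs a.toNat (a+d).toNat : Nat) : Int) - (d+1) + 1
            = ((lce cs a.toNat (a+d).toNat : Nat) : Int) - d from by ring,
          show ((lce cs a.toNat (a+d).toNat : Nat) : Int) + (d+1)
            = ((lce cs a.toNat (a+d).toNat : Nat) : Int) + d + 1 from by ring]
        split_ifs
        · rfl
        · rw [add_zero]
      rw [hstep]
      have ihh := ih (a-1) (t + tailSum ((lce cs a.toNat (a+d).toNat : Nat) : Int) (d + 1))
        (by omega) (by omega) (by omega)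
      rw [show a - 1 + 1 = a from by ring] at ihh
      rw [ihh, add_assoc]
    · have ha : a = -1 := by omega
      subst ha
      rw [PySem.List.pyRange_neg_one_eq_nil (le_refl _)]
      norm_num

lemma foldB_outer (cs : List Char) (n : Int) (hn : n = (cs.length : Int)) :
    ∀ (l : List Int), (∀ d ∈ l, 1 ≤ d ∧ d < n) → ∀ (t : Int),
      l.foldl (fun total d =>
          ((PySem.List.pyRange (n - d - 1) (-1) (-1)).foldl (calMisStep cs d) ((0 : Int), total)).2) t
        = t + (l.map (fun d => ((PySem.List.pyRange (n - d - 1) (-1) (-1)).map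
            (fun i => tailSum ((lce cs i.toNat (i+d).toNat : Nat) : Int) (d + 1))).sum)).sum := by
  intro l
  induction l with
  | nil => intro _ t; simp
  | cons d l ihl =>
    intro hmem t
    obtain ⟨hd1, hdn⟩ := hmem d (List.mem_cons_self)
    simp only [List.foldl_cons, List.map_cons, List.sum_cons]
    have h0 : ((lce cs (n - d - 1 + 1).toNat (n - d - 1 + 1 + d).toNat : Nat) : Int) = 0 := by
      rw [lce, dif_neg (by
        rintro ⟨_, hq, _⟩
        omega)]
      norm_num
    have hinner := foldB_inner cs n hn d hd1 hdn (n - d).toNat (n - d - 1) t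
      (by omega) (by omega) (le_refl _)
    rw [h0] at hinner
    rw [hinner]
    rw [ihl (fun x hx => hmem x (List.mem_cons_of_mem d hx))]
    ring

lemma cal_mis_alt_eq (str : String) :
    cal_mis_alt str = (((PySem.List.pyRange 1 (str.toList.length : Int) 1).map (fun d =>
        ((PySem.List.pyRange ((str.toList.length : Int) - d - 1) (-1) (-1)).map
          (fun i => tailSum ((lce str.toList i.toNat (i+d).toNat : Nat) : Int) (d + 1))).sum)).sum) % (10 ^ 9 + 7) := by
  have hdef : cal_mis_alt str
      = PySem.Int.mod ((PySem.List.pyRange 1 (str.toList.length : Int) 1).foldl (fun total d =>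
          ((PySem.List.pyRange ((str.toList.length : Int) - d - 1) (-1) (-1)).foldl
            (calMisStep str.toList d) ((0 : Int), total)).2) 0) (10 ^ 9 + 7) := rfl
  rw [hdef, mod_eq]
  rw [foldB_outer str.toList (str.toList.length : Int) rfl _
    (fun x hx => by
      have := PySem.List.mem_pyRange_one.mp hx
      omega) 0]
  rw [zero_add]

lemma sum_map_range (m : Nat) (f : Nat → Int) :
    ((List.range m).map f).sum = ∑ k ∈ Finset.range m, f k := rfl

lemma sum_map_pyRange (f : Int → Int) (a b : Int) :
    ((PySem.List.pyRange a b 1).map f).sum = ∑ k ∈ Finset.range (b - a).toNat, f (a + k) := by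
  rw [PySem.List.pyRange_one, List.map_map, sum_map_range]
  rfl

lemma sum_map_pyRange_desc (f : Int → Int) (a : Int) :
    ((PySem.List.pyRange a (-1) (-1)).map f).sum = ∑ k ∈ Finset.range (a + 1).toNat, f k := by
  rw [PySem.List.pyRange_neg_one_eq_reverse, List.map_reverse, List.sum_reverse]
  rw [show (-1 : Int) + 1 = 0 from by norm_num]
  rw [sum_map_pyRange]
  simp

lemma tri_sum (g : Nat → Nat → Int) :
    ∀ (N : Nat), ∑ i ∈ Finset.range N, ∑ j ∈ Finset.Ico (i+1) N, g i j
      = ∑ d ∈ Finset.Ico 1 N, ∑ i ∈ Finset.range (N - d), g i (i + d) := by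
  intro N
  induction N with
  | zero => simp
  | succ N ih =>
    rcases Nat.eq_zero_or_pos N with hN | hN
    · subst hN; simp
    obtain ⟨M, rfl⟩ : ∃ M, N = M + 1 := ⟨N - 1, by omega⟩
    have e1 : (∑ i ∈ Finset.range (M+1+1), ∑ j ∈ Finset.Ico (i+1) (M+1+1), g i j)
        = (∑ i ∈ Finset.range (M+1), ∑ j ∈ Finset.Ico (i+1) (M+1), g i j)
          + ∑ i ∈ Finset.range (M+1), g i (M+1) := by
      rw [Finset.sum_range_succ, Finset.Ico_self, Finset.sum_empty, add_zero,
        ← Finset.sum_add_distrib]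
      refine Finset.sum_congr rfl ?_
      intro i hi
      exact Finset.sum_Ico_succ_top (by have := Finset.mem_range.mp hi; omega) (g i)
    have e2 : (∑ d ∈ Finset.Ico 1 (M+1+1), ∑ i ∈ Finset.range (M+1+1-d), g i (i+d))
        = (∑ d ∈ Finset.Ico 1 (M+1), ∑ i ∈ Finset.range (M+1-d), g i (i+d))
          + ((∑ d ∈ Finset.Ico 1 (M+1), g (M+1-d) (M+1)) + g 0 (M+1)) := by
      rw [Finset.sum_Ico_succ_top (by omega : 1 ≤ M+1)]
      rw [show M+1+1-(M+1) = 1 from by omega, Finset.sum_range_one]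
      have hrow : ∀ d ∈ Finset.Ico 1 (M+1),
          ∑ i ∈ Finset.range (M+1+1-d), g i (i+d)
            = (∑ i ∈ Finset.range (M+1-d), g i (i+d)) + g (M+1-d) (M+1) := by
        intro d hd
        have hd' := Finset.mem_Ico.mp hd
        rw [show M+1+1-d = (M+1-d)+1 from by omega, Finset.sum_range_succ,
          show M+1-d+d = M+1 from by omega]
      rw [Finset.sum_congr rfl hrow, Finset.sum_add_distrib,
        show (0:Nat) + (M+1) = M+1 from by omega]
      ring
    have e3 : ∑ d ∈ Finset.Ico 1 (M+1), g (M+1-d) (M+1)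
        = ∑ j ∈ Finset.range M, g (j+1) (M+1) := by
      rw [Finset.sum_Ico_eq_sum_range, show M+1-1 = M from by omega,
        ← Finset.sum_range_reflect (fun j => g (j + 1) (M+1)) M]
      refine Finset.sum_congr rfl ?_
      intro k hk
      have := Finset.mem_range.mp hk
      congr 1
      omega
    have e4 : ∑ i ∈ Finset.range (M+1), g i (M+1)
        = (∑ j ∈ Finset.range M, g (j+1) (M+1)) + g 0 (M+1) :=
      Finset.sum_range_succ' (fun i => g i (M+1)) M
    rw [e1, e2, e3, e4, ih]

-- ===== VERDICT (by name: the statement is the Claim_ definition above) =====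
theorem cal_mis_spec : Claim_equal_cal_mis := by
  intro str _
  unfold Spec_cal_mis
  rw [cal_mis_eq, cal_mis_alt_eq]
  congr 1
  set cs := str.toList with hcs
  set m := cs.length with hm
  set g : Nat → Nat → Int := fun i j => tailSum ((lce cs i j : Nat) : Int) ((j : Int) - (i : Int) + 1) with hg
  have hA : ((PySem.List.pyRange 0 (m : Int) 1).map (fun i =>
        ((PySem.List.pyRange (i + 1) (m : Int) 1).map
          (fun j => tailSum ((lce cs i.toNat j.toNat : Nat) : Int) (j - i + 1))).sum)).sum
      = ∑ i ∈ Finset.range m, ∑ j ∈ Finset.Ico (i+1) m, g i j := by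
    rw [sum_map_pyRange]
    rw [show ((m : Int) - 0).toNat = m from by omega]
    refine Finset.sum_congr rfl ?_
    intro k hk
    have hk' : k < m := Finset.mem_range.mp hk
    rw [sum_map_pyRange, Finset.sum_Ico_eq_sum_range]
    rw [show ((m : Int) - (0 + (k : Int) + 1)).toNat = m - (k + 1) from by omega]
    refine Finset.sum_congr rfl ?_
    intro l hl
    have hl' : l < m - (k+1) := Finset.mem_range.mp hl
    simp only [hg]
    rw [show ((0 : Int) + (k : Int)).toNat = k from by omega]
    rw [show ((0 : Int) + (k : Int) + 1 + (l : Int)).toNat = k + 1 + l from by omega]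
    congr 1
    push_cast
    ring
  have hB : ((PySem.List.pyRange 1 (m : Int) 1).map (fun d =>
        ((PySem.List.pyRange ((m : Int) - d - 1) (-1) (-1)).map
          (fun i => tailSum ((lce cs i.toNat (i+d).toNat : Nat) : Int) (d + 1))).sum)).sum
      = ∑ d ∈ Finset.Ico 1 m, ∑ i ∈ Finset.range (m - d), g i (i + d) := by
    rw [sum_map_pyRange]
    rw [Finset.sum_Ico_eq_sum_range]
    rw [show ((m : Int) - 1).toNat = m - 1 from by omega]
    refine Finset.sum_congr rfl ?_
    intro k hk
    have hk' : k < m - 1 := Finset.mem_range.mp hk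
    rw [sum_map_pyRange_desc]
    rw [show ((m : Int) - (1 + (k : Int)) - 1 + 1).toNat = m - (1 + k) from by omega]
    refine Finset.sum_congr rfl ?_
    intro l hl
    have hl' : l < m - (1+k) := Finset.mem_range.mp hl
    simp only [hg]
    rw [show ((l : Int)).toNat = l from by omega]
    rw [show ((l : Int) + (1 + (k : Int))).toNat = l + (1 + k) from by omega]
    congr 1
    push_cast
    ring
  rw [hA, hB, tri_sum g m]
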